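-- pv_equiv track=rewrite | github.com/BrianMuigai/betbot | prep_training_data.py | get_form_points
-- ===== SOURCE A (Python) =====
-- def get_form_points(team_prog):
-- 	point = 0
-- 	for result in team_prog:
-- 		if result == 'W':
-- 			point += 3
-- 		elif result == 'D':
-- 			point +=1
--
-- 	return point
-- ===== SOURCE B (Python) =====
-- def get_form_points(team_prog):
--     return 3 * team_prog.count('W') + team_prog.count('D')
-- ===== Notes on version B (the rewrite author's own statement) =====
-- stated objective: idiomatic
-- what changed: Replaces the branch-and-accumulate loop with two count() passes combined arithmetically: 3*count('W') + count('D').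
import Mathlib
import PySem

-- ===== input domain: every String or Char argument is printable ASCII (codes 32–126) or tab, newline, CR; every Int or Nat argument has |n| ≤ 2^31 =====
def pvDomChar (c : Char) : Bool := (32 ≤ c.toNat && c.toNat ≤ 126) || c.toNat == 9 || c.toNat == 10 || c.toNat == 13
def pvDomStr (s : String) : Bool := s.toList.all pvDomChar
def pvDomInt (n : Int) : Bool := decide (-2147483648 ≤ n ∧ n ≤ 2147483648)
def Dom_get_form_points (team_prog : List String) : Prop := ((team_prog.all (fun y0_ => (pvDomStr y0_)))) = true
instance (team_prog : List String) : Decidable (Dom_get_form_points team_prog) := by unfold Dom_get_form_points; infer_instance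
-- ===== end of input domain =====

-- ===== PORT A =====
-- Port of A: accumulate points over the list (+3 for 'W', +1 for 'D').
def get_form_points (team_prog : List String) : Int :=
  team_prog.foldl (fun point result =>
    if result == "W" then point + 3
    else if result == "D" then point + 1
    else point) 0

-- ===== PORT B =====
-- Port of B: 3 * count('W') + count('D').
def get_form_points_alt (team_prog : List String) : Int :=
  3 * (PySem.List.count team_prog "W" : Int) + (PySem.List.count team_prog "D" : Int)

-- ===== PRECONDITION & SPEC =====
def Spec_get_form_points (team_prog : List String) (out : Int) : Prop := out = get_form_points_alt team_prog
instance (team_prog : List String) (out : Int) : Decidable (Spec_get_form_points team_prog out) := by unfold Spec_get_form_points; infer_instance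

-- ===== CLAIM (what is proved, stated in full; the proofs are below) =====
def Claim_equal_get_form_points : Prop := ∀ (team_prog : List String), Dom_get_form_points team_prog → Spec_get_form_points team_prog (get_form_points team_prog)

-- ===== LEMMAS AND PROOFS =====

-- ===== VERDICT (by name: the statement is the Claim_ definition above) =====
theorem foldl_points (l : List String) (a : Int) :
    l.foldl (fun point result =>
      if result == "W" then point + 3
      else if result == "D" then point + 1
      else point) a
      = a + 3 * (l.count "W" : Int) + (l.count "D" : Int) := by
  induction l generalizing a with
  | nil => simp
  | cons x xs ih =>
    simp only [List.foldl_cons, ih, List.count_cons]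
    by_cases hW : x = "W" <;> by_cases hD : x = "D" <;>
      simp [hW, hD] <;> ring

theorem get_form_points_spec : Claim_equal_get_form_points := by
  intro team_prog _
  show get_form_points team_prog = get_form_points_alt team_prog
  unfold get_form_points get_form_points_alt
  rw [foldl_points, PySem.List.count_eq, PySem.List.count_eq]
  ring
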